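-- pv_equiv track=rewrite | github.com/flying-dolphin/table-tennis-db | scripts/translate_events_calendar.py | _count_completed_batches
-- ===== SOURCE A (Python) =====
-- from typing import Any
--
-- def _is_value_translated(original: str, translated: str) -> bool:
--     if not original:
--         return True
--     if not translated:
--         return False
--     return translated.strip() != original.strip()
--
-- def _is_event_fully_translated(event: dict[str, Any]) -> bool:
--     """事件中所有需要翻译的字段都成功转为中文时，才视为完成。"""
--     name_ok = _is_value_translated(event.get("name", ""), event.get("name_zh", ""))
--     location_ok = _is_value_translated(event.get("location", ""), event.get("location_zh", ""))
--     return name_ok and location_ok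
--
-- def _count_completed_batches(events: list[dict[str, Any]], batch_size: int) -> int:
--     """只统计前缀中“完全翻译成功”的批次，用于断点续传。"""
--     completed = 0
--     for start in range(0, len(events), batch_size):
--         batch = events[start:start + batch_size]
--         if len(batch) < batch_size:
--             break
--         if all(_is_event_fully_translated(event) for event in batch):
--             completed += 1
--             continue
--         break
--     return completed
-- ===== SOURCE B (Python) =====
-- from typing import Any
--
-- def _is_value_translated(original: str, translated: str) -> bool:
--     if not original:
--         return True
--     if not translated:
--         return False
--     return translated.strip() != original.strip()
--
-- def _is_event_fully_translated(event: dict[str, Any]) -> bool: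
--     name_ok = _is_value_translated(event.get("name", ""), event.get("name_zh", ""))
--     location_ok = _is_value_translated(event.get("location", ""), event.get("location_zh", ""))
--     return name_ok and location_ok
--
-- def _count_completed_batches(events: list[dict[str, Any]], batch_size: int) -> int:
--     # One linear scan: find the first event that is not fully translated;
--     # a batch counts iff it lies entirely before that point (and is complete).
--     if batch_size <= 0:
--         return 0
--     first_bad = len(events)
--     for i, event in enumerate(events):
--         if not _is_event_fully_translated(event):
--             first_bad = i
--             break
--     return first_bad // batch_size
-- ===== Notes on version B (the rewrite author's own statement) =====
-- stated objective: simpler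
-- what changed: Instead of slicing the list into batches and re-checking each batch with all(), B makes one linear scan for the index of the first not-fully-translated event and returns first_bad // batch_size (guarding batch_size <= 0).
import Mathlib
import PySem

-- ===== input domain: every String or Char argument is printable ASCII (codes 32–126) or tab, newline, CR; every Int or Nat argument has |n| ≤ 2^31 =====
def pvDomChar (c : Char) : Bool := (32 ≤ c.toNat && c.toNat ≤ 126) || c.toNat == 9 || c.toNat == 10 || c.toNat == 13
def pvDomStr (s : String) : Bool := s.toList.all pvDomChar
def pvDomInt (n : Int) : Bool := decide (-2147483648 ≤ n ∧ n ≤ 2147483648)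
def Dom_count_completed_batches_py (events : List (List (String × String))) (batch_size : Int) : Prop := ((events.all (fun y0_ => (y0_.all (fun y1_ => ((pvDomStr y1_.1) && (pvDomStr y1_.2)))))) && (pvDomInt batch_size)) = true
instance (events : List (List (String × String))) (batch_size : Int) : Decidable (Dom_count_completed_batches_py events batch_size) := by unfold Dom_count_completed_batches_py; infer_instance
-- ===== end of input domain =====

-- B replaces A's batch-slicing loop by one linear scan for the first not-fully-translated
-- event, returning first_bad // batch_size (simpler decomposition, same cost).


-- ===== PORT A =====
-- shared helpers (same-module helpers of A, used unchanged by B)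

-- dict.get(k, d): first match in the association list
def dictGetD (ev : List (String × String)) (k d : String) : String :=
  match ev.find? (fun p => p.1 == k) with
  | some p => p.2
  | none => d

def isValueTranslated (original translated : String) : Bool :=
  if original == "" then true
  else if translated == "" then false
  else !(PySem.Str.strip translated == PySem.Str.strip original)

def isEventFullyTranslated (event : List (String × String)) : Bool :=
  let name_ok := isValueTranslated (dictGetD event "name" "") (dictGetD event "name_zh" "")
  let location_ok := isValueTranslated (dictGetD event "location" "") (dictGetD event "location_zh" "")
  name_ok && location_ok

-- the for-loop over range(0, len(events), batch_size) with break
def countLoopA (events : List (List (String × String))) (bs : Int) :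
    List Int → Int → Int
  | [], completed => completed
  | start :: rest, completed =>
    let batch := PySem.List.slice events (some start) (some (start + bs))
    if (batch.length : Int) < bs then completed
    else if batch.all isEventFullyTranslated then countLoopA events bs rest (completed + 1)
    else completed

def count_completed_batches_py (events : List (List (String × String))) (batch_size : Int) : Int :=
  countLoopA events batch_size (PySem.List.pyRange 0 (events.length : Int) batch_size) 0

-- ===== PORT B =====
-- index of the first not-fully-translated event (length if none): B's scan loop
def firstBad : List (List (String × String)) → Nat
  | [] => 0
  | e :: rest => if !isEventFullyTranslated e then 0 else 1 + firstBad rest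

def count_completed_batches_py_alt (events : List (List (String × String))) (batch_size : Int) : Int :=
  if batch_size ≤ 0 then 0
  else PySem.Int.floordiv (firstBad events : Int) batch_size

-- ===== PRECONDITION & SPEC =====
-- batch_size = 0 makes A's range(...) raise ValueError; that is the only input A raises on.
def Pre_count_completed_batches_py (events : List (List (String × String))) (batch_size : Int) : Prop :=
  batch_size ≠ 0
instance (events : List (List (String × String))) (batch_size : Int) : Decidable (Pre_count_completed_batches_py events batch_size) := by unfold Pre_count_completed_batches_py; infer_instance

def pvWitness_count_completed_batches_py : (List (List (String × String))) × Int :=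
  ([[("name", "a"), ("name_zh", "b")]], 1)

def Spec_count_completed_batches_py (events : List (List (String × String))) (batch_size : Int) (out : Int) : Prop := out = count_completed_batches_py_alt events batch_size
instance (events : List (List (String × String))) (batch_size : Int) (out : Int) : Decidable (Spec_count_completed_batches_py events batch_size out) := by unfold Spec_count_completed_batches_py; infer_instance

-- ===== CLAIM (what is proved, stated in full; the proofs are below) =====
def Claim_equal_count_completed_batches_py : Prop := ∀ (events : List (List (String × String))) (batch_size : Int), Dom_count_completed_batches_py events batch_size → Pre_count_completed_batches_py events batch_size → Spec_count_completed_batches_py events batch_size (count_completed_batches_py events batch_size)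


-- ===== LEMMAS AND PROOFS =====

lemma pyRange_pos_nil {a n b : Int} (hb : 0 < b) (h : n ≤ a) :
    PySem.List.pyRange a n b = [] := by
  rw [PySem.List.pyRange_of_pos _ _ hb, if_neg (by omega)]
  simp

lemma pyRange_neg_nil {a n b : Int} (hb : b < 0) (h : a ≤ n) :
    PySem.List.pyRange a n b = [] := by
  simp only [PySem.List.pyRange, if_neg (by omega : ¬ b = 0), if_neg (by omega : ¬ 0 < b),
    if_neg (by omega : ¬ n < a)]
  simp

lemma pyRange_pos_cons {a n b : Int} (hb : 0 < b) (h : a < n) :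
    PySem.List.pyRange a n b = a :: PySem.List.pyRange (a + b) n b := by
  rw [PySem.List.pyRange_of_pos _ _ hb, PySem.List.pyRange_of_pos _ _ hb, if_pos h]
  have hc : 0 < ((n - a + b - 1) / b).toNat := by
    have h1 : 1 ≤ (n - a + b - 1) / b := by
      have := Int.le_ediv_iff_mul_le (a := 1) (b := n - a + b - 1) hb
      rw [this]; omega
    omega
  obtain ⟨m, hm⟩ : ∃ m, ((n - a + b - 1) / b).toNat = m + 1 := ⟨_, (Nat.succ_pred_eq_of_pos hc).symm⟩
  rw [hm, List.range_succ_eq_map]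
  have hcount : (if a + b < n then ((n - (a + b) + b - 1) / b).toNat else 0) = m := by
    by_cases h2 : a + b < n
    · rw [if_pos h2]
      have : (n - (a + b) + b - 1) / b = (n - a + b - 1) / b - 1 := by
        have : n - (a + b) + b - 1 = (n - a + b - 1) + (-1) * b := by ring
        rw [this, Int.add_mul_ediv_right _ _ (by omega : b ≠ 0)]
        exact Int.sub_eq_add_neg.symm
      omega
    · rw [if_neg h2]
      have h3 : (n - a + b - 1) / b ≤ 1 := by
        rw [Int.ediv_le_iff_le_mul hb]; omega
      omega
  rw [hcount]
  simp only [List.map_cons, List.map_map]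
  refine List.cons_eq_cons.mpr ⟨by simp, ?_⟩
  apply List.map_congr_left
  intro k _
  simp only [Function.comp_apply]
  push_cast
  ring

lemma firstBad_le_length (evs : List (List (String × String))) : firstBad evs ≤ evs.length := by
  induction evs with
  | nil => simp [firstBad]
  | cons e rest ih =>
    simp only [firstBad, List.length_cons]
    split <;> omega

lemma firstBad_of_take_all {k : Nat} {evs : List (List (String × String))}
    (hall : (evs.take k).all isEventFullyTranslated = true) (hk : k ≤ evs.length) :
    firstBad evs = k + firstBad (evs.drop k) := by
  induction k generalizing evs with
  | zero => simp
  | succ k ih =>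
    cases evs with
    | nil => simp at hk
    | cons e rest =>
      simp only [List.take_succ_cons, List.all_cons, Bool.and_eq_true] at hall
      simp only [firstBad, hall.1, Bool.not_true, Bool.false_eq_true, if_false, List.drop_succ_cons]
      rw [ih hall.2 (by simpa using hk)]
      omega

lemma firstBad_of_take_not_all {k : Nat} {evs : List (List (String × String))}
    (h : ¬ (evs.take k).all isEventFullyTranslated = true) :
    firstBad evs < k := by
  induction evs generalizing k with
  | nil => simp at h
  | cons e rest ih =>
    cases k with
    | zero => simp at h
    | succ k =>
      simp only [List.take_succ_cons, List.all_cons, Bool.and_eq_true] at h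
      by_cases he : isEventFullyTranslated e
      · have : ¬ (rest.take k).all isEventFullyTranslated = true := by tauto
        have := ih this
        simp only [firstBad, he, Bool.not_true, Bool.false_eq_true, if_false]
        omega
      · simp only [firstBad, he, Bool.not_false, if_true]
        omega

lemma countLoopA_eq (b : Nat) (hb : 0 < b) (events : List (List (String × String))) :
    ∀ (k s : Nat) (c : Int), events.length - s ≤ k →
      countLoopA events (b : Int) (PySem.List.pyRange (s : Int) (events.length : Int) (b : Int)) c
        = c + ((firstBad (events.drop s) / b : Nat) : Int) := by
  intro k
  induction k with
  | zero =>
    intro s c hk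
    rw [pyRange_pos_nil (by exact_mod_cast hb) (by exact_mod_cast (by omega : events.length ≤ s))]
    rw [List.drop_eq_nil_of_le (by omega)]
    simp [countLoopA, firstBad]
  | succ k ih =>
    intro s c hk
    by_cases hs : events.length ≤ s
    · rw [pyRange_pos_nil (by exact_mod_cast hb) (by exact_mod_cast hs)]
      rw [List.drop_eq_nil_of_le hs]
      simp [countLoopA, firstBad]
    · push_neg at hs
      rw [pyRange_pos_cons (by exact_mod_cast hb) (by exact_mod_cast hs)]
      show (let batch := PySem.List.slice events (some (s:Int)) (some ((s:Int) + (b:Int)));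
        if (batch.length : Int) < (b:Int) then c
        else if batch.all isEventFullyTranslated then
          countLoopA events (b:Int) (PySem.List.pyRange ((s:Int)+(b:Int)) (events.length : Int) (b:Int)) (c + 1)
        else c) = _
      have hslice : PySem.List.slice events (some (s:Int)) (some ((s:Int) + (b:Int)))
          = (events.drop s).take b := by
        exact_mod_cast PySem.List.slice_natCast_add events s b
      simp only [hslice]
      have hlen : ((events.drop s).take b).length = min b (events.length - s) := by
        simp [Nat.min_comm]
      by_cases hshort : ((events.drop s).take b).length < b
      · rw [if_pos (by exact_mod_cast hshort)]
        have hfb : firstBad (events.drop s) < b := by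
          have := firstBad_le_length (events.drop s)
          simp only [List.length_drop] at this
          omega
        rw [Nat.div_eq_of_lt hfb]
        simp
      · rw [if_neg (by exact_mod_cast hshort)]
        have hble : b ≤ events.length - s := by omega
        by_cases hall : ((events.drop s).take b).all isEventFullyTranslated = true
        · rw [if_pos hall]
          have hcast : (s:Int) + (b:Int) = ((s + b : Nat) : Int) := by push_cast; ring
          rw [hcast, ih (s + b) (c + 1) (by omega)]
          rw [firstBad_of_take_all hall (by simp; omega), List.drop_drop]
          have hdiv : (b + firstBad (List.drop (s + b) events)) / b
              = firstBad (List.drop (s + b) events) / b + 1 := by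
            rw [Nat.add_comm, Nat.add_div_right _ hb]
          rw [hdiv]
          push_cast
          ring
        · rw [if_neg hall]
          have hfb : firstBad (events.drop s) < b := firstBad_of_take_not_all hall
          rw [Nat.div_eq_of_lt hfb]
          simp

lemma floordiv_natCast (a b : Nat) : PySem.Int.floordiv (a : Int) (b : Int) = ((a / b : Nat) : Int) := by
  rw [PySem.Int.floordiv, Int.fdiv_eq_ediv, if_pos (Or.inl (by positivity)), Int.sub_zero]
  exact_mod_cast (Int.natCast_div a b).symm

-- ===== VERDICT (by name: the statement is the Claim_ definition above) =====
theorem count_completed_batches_py_spec : Claim_equal_count_completed_batches_py := by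
  intro events bs _ hpre
  unfold Spec_count_completed_batches_py count_completed_batches_py count_completed_batches_py_alt
  unfold Pre_count_completed_batches_py at hpre
  by_cases hb : bs ≤ 0
  · rw [if_pos hb, pyRange_neg_nil (by omega) (by positivity)]
    simp [countLoopA]
  · push_neg at hb
    rw [if_neg (by omega)]
    have hbs : bs = ((bs.toNat : Nat) : Int) := by omega
    rw [hbs, floordiv_natCast]
    have := countLoopA_eq bs.toNat (by omega) events events.length 0 0 (by omega)
    simpa using this
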